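-- pv_equiv track=rewrite | github.com/Liwenbin1996/Data_Structures_and_Algorithms | OtherQuestion.py | oneNums1
-- ===== SOURCE A (Python) =====
-- def oneNums1(num):
--     if num < 1:
--         return 0
--     res = 0
--     for i in range(1, num+1):
--         cur = i
--         tmp = 0
--         while cur != 0:
--             if cur % 10 == 1:
--                 tmp += 1
--             cur //= 10
--         res += tmp
--     return res
-- ===== SOURCE B (Python) =====
-- def oneNums1(num):
--     res = 0
--     p = 1
--     while p <= num:
--         res += (num // (10 * p)) * p + min(max(num % (10 * p) - p + 1, 0), p)
--         p *= 10
--     return res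
-- ===== Notes on version B (the rewrite author's own statement) =====
-- stated objective: faster
-- what changed: Replaces the per-number digit-scanning double loop with the closed-form per-place-value count of 1s (sum over powers of ten), so no iteration over 1..num at all.
import Mathlib
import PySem

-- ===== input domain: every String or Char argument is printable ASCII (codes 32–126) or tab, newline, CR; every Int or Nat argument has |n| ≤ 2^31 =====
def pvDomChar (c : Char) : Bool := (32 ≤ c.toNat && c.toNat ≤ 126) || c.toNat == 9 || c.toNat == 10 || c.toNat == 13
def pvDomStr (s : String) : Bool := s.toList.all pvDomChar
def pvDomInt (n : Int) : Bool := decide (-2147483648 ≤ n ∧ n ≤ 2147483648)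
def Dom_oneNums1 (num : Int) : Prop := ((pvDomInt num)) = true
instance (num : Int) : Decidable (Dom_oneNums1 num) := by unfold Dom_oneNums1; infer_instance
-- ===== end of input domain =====

-- B replaces A's per-number digit-scanning double loop by the closed-form count of 1s
-- contributed by each place value (one loop over powers of ten).

-- ===== PORT A =====
-- inner `while cur != 0` loop of A; the guard is written `0 < cur` purely for
-- termination: A only ever runs it with cur ≥ 1 (on negative cur Python would diverge).
def oneNums1While (cur tmp : Int) : Int :=
  if h : 0 < cur then
    oneNums1While (PySem.Int.floordiv cur 10)
      (tmp + (if PySem.Int.mod cur 10 = 1 then 1 else 0))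
  else tmp
termination_by cur.toNat
decreasing_by
  rw [PySem.Int.floordiv_eq_ediv_of_pos (by norm_num : (0:Int) < 10)]
  omega

def oneNums1 (num : Int) : Int :=
  if num < 1 then 0
  else (PySem.List.pyRange 1 (num + 1) 1).foldl (fun res i => res + oneNums1While i 0) 0

-- ===== PORT B =====
-- B's `while p <= num` loop; the `1 ≤ p` conjunct is purely a totality guard:
-- p starts at 1 and is only multiplied by 10.
def altLoop (num p res : Int) : Int :=
  if _h : 1 ≤ p ∧ p ≤ num then
    altLoop num (10 * p)
      (res + PySem.Int.floordiv num (10 * p) * p +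
        min (max (PySem.Int.mod num (10 * p) - p + 1) 0) p)
  else res
termination_by (num + 1 - p).toNat
decreasing_by omega

def oneNums1_alt (num : Int) : Int := altLoop num 1 0

-- ===== PRECONDITION & SPEC =====
def Spec_oneNums1 (num : Int) (out : Int) : Prop := out = oneNums1_alt num
instance (num : Int) (out : Int) : Decidable (Spec_oneNums1 num out) := by unfold Spec_oneNums1; infer_instance

-- ===== CLAIM (what is proved, stated in full; the proofs are below) =====
def Claim_equal_oneNums1 : Prop := ∀ (num : Int), Dom_oneNums1 num → Spec_oneNums1 num (oneNums1 num)

-- ===== LEMMAS AND PROOFS =====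

-- contribution of place value p to the count of 1-digits in 1..n (ediv/emod form), as B computes it
def placeF (n p : Int) : Int := n / (10 * p) * p + min (max (n % (10 * p) - p + 1) 0) p

-- accumulator shift for A's inner loop
theorem oneNums1While_shift (cur tmp : Int) : oneNums1While cur tmp = tmp + oneNums1While cur 0 := by
  induction hk : cur.toNat using Nat.strong_induction_on generalizing cur tmp with
  | _ k ih =>
  subst hk
  conv_lhs => rw [oneNums1While]
  conv_rhs => rw [oneNums1While]
  by_cases h : 0 < cur
  · rw [dif_pos h, dif_pos h]
    have hd : PySem.Int.floordiv cur 10 = cur / 10 :=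
      PySem.Int.floordiv_eq_ediv_of_pos (by norm_num)
    have hlt : (PySem.Int.floordiv cur 10).toNat < cur.toNat := by rw [hd]; omega
    rw [ih _ hlt _ _ rfl, ih _ hlt _ (0 + _) rfl]
    ring
  · rw [dif_neg h, dif_neg h]
    ring

-- one step of A's inner loop (ediv/emod form)
theorem oneNums1While_rec (m : Int) (hm : 0 < m) :
    oneNums1While m 0 = (if m % 10 = 1 then 1 else 0) + oneNums1While (m / 10) 0 := by
  conv_lhs => rw [oneNums1While]
  rw [dif_pos hm, oneNums1While_shift,
    PySem.Int.floordiv_eq_ediv_of_pos (by norm_num : (0:Int) < 10),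
    PySem.Int.mod_eq_emod_of_pos (by norm_num : (0:Int) < 10)]
  ring

theorem oneNums1While_zero : oneNums1While 0 0 = 0 := by
  rw [oneNums1While]; norm_num

-- accumulator shift for B's loop
theorem altLoop_shift (num p res : Int) : altLoop num p res = res + altLoop num p 0 := by
  induction hk : (num + 1 - p).toNat using Nat.strong_induction_on generalizing p res with
  | _ k ih =>
  subst hk
  conv_lhs => rw [altLoop]
  conv_rhs => rw [altLoop]
  by_cases h : 1 ≤ p ∧ p ≤ num
  · rw [dif_pos h, dif_pos h]
    have hlt : (num + 1 - 10 * p).toNat < (num + 1 - p).toNat := by omega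
    conv_lhs => rw [ih _ hlt (10 * p) _ rfl]
    conv_rhs => rw [ih _ hlt (10 * p) _ rfl]
    ring
  · rw [dif_neg h, dif_neg h]
    ring

-- one step of B's loop (ediv/emod form)
theorem altLoop_step (n p : Int) (hp : 1 ≤ p) :
    altLoop n p 0 = if p ≤ n then placeF n p + altLoop n (10 * p) 0 else 0 := by
  conv_lhs => rw [altLoop]
  by_cases hpn : p ≤ n
  · rw [dif_pos ⟨hp, hpn⟩, if_pos hpn, altLoop_shift]
    rw [PySem.Int.floordiv_eq_ediv_of_pos (by omega : (0:Int) < 10 * p),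
        PySem.Int.mod_eq_emod_of_pos (by omega : (0:Int) < 10 * p)]
    simp only [placeF]
    ring
  · rw [dif_neg (fun h => hpn h.2), if_neg hpn]

theorem placeF_zero (m p : Int) (hp : 1 ≤ p) (hm0 : 0 ≤ m) (hmp : m < p) : placeF m p = 0 := by
  simp only [placeF]
  rw [Int.ediv_eq_zero_of_lt hm0 (by omega), Int.emod_eq_of_lt hm0 (by omega)]
  have h3 : min (max (m - p + 1) 0) p = 0 := by omega
  rw [h3]
  ring

-- per-place delta: going from n-1 to n adds 1 at place p iff the digit of n at place p is 1
theorem placeF_delta (n p : Int) (_hn : 1 ≤ n) (hp : 1 ≤ p) :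
    placeF n p = placeF (n - 1) p + (if n / p % 10 = 1 then 1 else 0) := by
  have hP : (0:Int) < 10 * p := by omega
  have e1 := Int.mul_ediv_add_emod n p
  have e2 := Int.mul_ediv_add_emod (n / p) 10
  have e3 := Int.mul_ediv_add_emod n (10 * p)
  have hdd : n / p / 10 = n / (10 * p) := by
    rw [Int.ediv_ediv_of_nonneg (by omega : (0:Int) ≤ p), mul_comm p 10]
  rw [hdd] at e2
  have hc0 : 0 ≤ n / p % 10 := Int.emod_nonneg _ (by norm_num)
  have hc9 : n / p % 10 < 10 := Int.emod_lt_of_pos _ (by norm_num)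
  have hl0 : 0 ≤ n % p := Int.emod_nonneg _ (by omega)
  have hlp : n % p < p := Int.emod_lt_of_pos _ (by omega)
  set q := n / (10 * p) with hq
  set c := n / p % 10 with hc
  set l := n % p with hl
  have hcp0 : 0 ≤ c * p := mul_nonneg hc0 (by omega)
  have hcp9 : c * p ≤ 9 * p := mul_le_mul_of_nonneg_right (by omega) (by omega)
  have hr : n % (10 * p) = c * p + l := by linear_combination e3 - e1 - p * e2
  by_cases h00 : c = 0 ∧ l = 0
  · obtain ⟨hc', hl'⟩ := h00
    have hrn : n % (10 * p) = 0 := by rw [hr, hc', hl']; ring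
    have hu := (Int.ediv_emod_unique (a := n - 1) (b := 10 * p) (q := q - 1) (r := 10 * p - 1) hP).mpr
      ⟨by linear_combination e3 - hrn, by omega, by omega⟩
    obtain ⟨hq', hr'⟩ := hu
    simp only [placeF]
    rw [← hq, hrn, hq', hr', hc', if_neg (by norm_num)]
    have m1 : min (max ((0:Int) - p + 1) 0) p = 0 := by omega
    have m2 : min (max (10 * p - 1 - p + 1) 0) p = p := by omega
    rw [m1, m2]
    ring
  · have h1 : 1 ≤ c * p + l := by
      rcases not_and_or.mp h00 with h | h
      · have hc1 : 1 ≤ c := by omega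
        have h2 : 1 * p ≤ c * p := mul_le_mul_of_nonneg_right hc1 (by omega)
        linarith
      · have : 1 ≤ l := by omega
        linarith
    have hu := (Int.ediv_emod_unique (a := n - 1) (b := 10 * p) (q := q) (r := c * p + l - 1) hP).mpr
      ⟨by linear_combination e3 - hr, by linarith, by linarith⟩
    obtain ⟨hq', hr'⟩ := hu
    simp only [placeF]
    rw [← hq, hr, hq', hr']
    have key : ∀ c' : Int, 0 ≤ c' → c' < 10 → 1 ≤ c' * p + l →
        min (max (c' * p + l - p + 1) 0) p
          = min (max (c' * p + l - 1 - p + 1) 0) p + (if c' = 1 then 1 else 0) := by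
      intro c' h0 h9 h1'
      interval_cases c' <;> simp <;> omega
    have hk := key c hc0 hc9 h1
    linear_combination hk

-- loop delta: the tail of B's loop starting at place p grows by the number of 1-digits of n/p
theorem altLoop_delta (n : Int) (hn : 1 ≤ n) :
    ∀ p : Int, 1 ≤ p → altLoop n p 0 = altLoop (n - 1) p 0 + oneNums1While (n / p) 0 := by
  have H : ∀ (k : Nat) (p : Int), 1 ≤ p → (n + 1 - p).toNat = k →
      altLoop n p 0 = altLoop (n - 1) p 0 + oneNums1While (n / p) 0 := by
    intro k
    induction k using Nat.strong_induction_on with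
    | _ k ih =>
    intro p hp hk
    by_cases hpn : p ≤ n
    · rw [altLoop_step n p hp, altLoop_step (n - 1) p hp, if_pos hpn]
      have hm1 : 1 ≤ n / p := by
        rw [Int.le_ediv_iff_mul_le (by omega : (0:Int) < p)]
        omega
      have hrec := oneNums1While_rec (n / p) (by omega)
      have hdd : n / p / 10 = n / (10 * p) := by
        rw [Int.ediv_ediv_of_nonneg (by omega : (0:Int) ≤ p), mul_comm p 10]
      have htail : altLoop n (10 * p) 0 = altLoop (n - 1) (10 * p) 0 + oneNums1While (n / (10 * p)) 0 := by
        by_cases h2 : 10 * p ≤ n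
        · exact ih ((n + 1 - 10 * p).toNat) (by omega) (10 * p) (by omega) rfl
        · rw [altLoop_step n (10 * p) (by omega), if_neg (by omega),
              altLoop_step (n - 1) (10 * p) (by omega), if_neg (by omega),
              Int.ediv_eq_zero_of_lt (by omega) (by omega), oneNums1While_zero]
          norm_num
      by_cases hpn1 : p ≤ n - 1
      · rw [if_pos hpn1, htail, hrec, hdd, placeF_delta n p hn hp]
        ring
      · rw [if_neg hpn1, htail,
            altLoop_step (n - 1) (10 * p) (by omega), if_neg (by omega),
            hrec, hdd, placeF_delta n p hn hp,
            placeF_zero (n - 1) p hp (by omega) (by omega)]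
        ring
    · rw [altLoop_step n p hp, if_neg hpn, altLoop_step (n - 1) p hp, if_neg (by omega),
          Int.ediv_eq_zero_of_lt (by omega) (by omega), oneNums1While_zero]
      norm_num
  exact fun p hp => H (n + 1 - p).toNat p hp rfl

theorem main_eq (n : Int) : oneNums1 n = altLoop n 1 0 := by
  induction hk : n.toNat using Nat.strong_induction_on generalizing n with
  | _ k ih =>
  subst hk
  by_cases hn : n < 1
  · rw [oneNums1, if_pos hn, altLoop_step n 1 le_rfl, if_neg (by omega)]
  · rw [not_lt] at hn
    have hsplit : PySem.List.pyRange 1 (n + 1) 1 = PySem.List.pyRange 1 n 1 ++ [n] :=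
      PySem.List.pyRange_one_succ_right (by omega)
    have hprev : oneNums1 (n - 1) = (PySem.List.pyRange 1 n 1).foldl (fun res i => res + oneNums1While i 0) 0 := by
      by_cases h1 : n - 1 < 1
      · rw [oneNums1, if_pos h1, PySem.List.pyRange_one_eq_nil (by omega)]
        rfl
      · rw [oneNums1, if_neg h1]
        have hnn : n - 1 + 1 = n := by ring
        rw [hnn]
    have hA : oneNums1 n = oneNums1 (n - 1) + oneNums1While n 0 := by
      rw [oneNums1, if_neg (by omega), hsplit, List.foldl_append, ← hprev]
      simp [List.foldl]
    have hiw := ih (n - 1).toNat (by omega) (n - 1) rfl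
    have hd := altLoop_delta n hn 1 le_rfl
    rw [hA, hiw, hd, Int.ediv_one]

-- ===== VERDICT (by name: the statement is the Claim_ definition above) =====
theorem oneNums1_spec : Claim_equal_oneNums1 := by
  intro num _
  unfold Spec_oneNums1 oneNums1_alt
  exact main_eq num
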